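-- pv_equiv track=rewrite | github.com/maetomo12312/hozon1250368 | testSearch.py | rulejudge
-- ===== SOURCE A (Python) =====
-- def rulejudge(thinking_times):
--     quick_judge_total1 = 60
--     quick_judge_total2 = 60
--     quick_judge_total3 = 900
--     quick_judge_total4 = 900
--     Quick_Juudge = 0
--
--     for i, time in enumerate(thinking_times):
--         if i % 2 == 0:  # 先手の手
--             quick_judge_total1 -= time
--             if quick_judge_total1 < 0 and time >= 31:
--                 Quick_Juudge = 1
--             quick_judge_total3 -= time
--             if Quick_Juudge == 1 and quick_judge_total3 < 0 and time >= 61: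
--                 return 2  # すぐに3を返す
--         else:  # 後手の手
--             quick_judge_total2 -= time
--             if quick_judge_total2 < 0 and time >= 31:
--                 Quick_Juudge = 1
--             quick_judge_total4 -= time
--             if Quick_Juudge == 1 and quick_judge_total4 < 0 and time >= 61:
--                 return 2  # すぐに3を返す
--
--     return Quick_Juudge
-- ===== SOURCE B (Python) =====
-- def rulejudge(thinking_times):
--     first, second = [], []
--     for i, t in enumerate(thinking_times):
--         if i % 2 == 0:
--             first.append(t)
--         else:
--             second.append(t)
--
--     def scan(times):
--         total = 0
--         flag = False
--         hard = False
--         for t in times: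
--             total += t
--             if total > 60 and t >= 31:
--                 flag = True
--             if total > 900 and t >= 61:
--                 hard = True
--         return flag, hard
--
--     f1, h1 = scan(first)
--     f2, h2 = scan(second)
--     return 2 if h1 or h2 else 1 if f1 or f2 else 0
-- ===== Notes on version B (the rewrite author's own statement) =====
-- stated objective: alternative
-- what changed: Deinterleaves the moves into the two players' subsequences once, then runs an independent running-sum scan per player producing (flag, hard) booleans and combines them, instead of A's single interleaved loop over four countdown budgets with a shared integer flag, a redundant flag guard on the hard rule and an early return.
import Mathlib
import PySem

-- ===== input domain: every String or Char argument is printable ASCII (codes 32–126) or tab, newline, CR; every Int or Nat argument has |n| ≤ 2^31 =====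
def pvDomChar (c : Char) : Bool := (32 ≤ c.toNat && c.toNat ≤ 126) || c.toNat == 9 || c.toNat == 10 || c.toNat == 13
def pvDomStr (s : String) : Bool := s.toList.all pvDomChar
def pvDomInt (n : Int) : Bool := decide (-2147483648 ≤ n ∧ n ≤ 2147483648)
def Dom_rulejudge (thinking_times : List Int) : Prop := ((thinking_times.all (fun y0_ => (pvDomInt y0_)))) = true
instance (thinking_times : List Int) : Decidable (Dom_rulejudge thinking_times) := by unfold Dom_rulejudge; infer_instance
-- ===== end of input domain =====

-- B replaces A's interleaved countdown loop (shared flag, redundant guard, early return) by a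
-- per-player deinterleave followed by two independent running-sum scans; objective: alternative.

-- ===== PORT A =====
-- the for-loop over enumerate(thinking_times) with its early 'return 2', as recursion over the enumerated list
def rulejudgeLoop : Int → Int → Int → Int → Int → List (Int × Int) → Int
  | _, _, _, _, q, [] => q
  | t1, t2, t3, t4, q, (i, time) :: rest =>
    if PySem.Int.mod i 2 = 0 then
      let t1 := t1 - time
      let q := if t1 < 0 ∧ time ≥ 31 then 1 else q
      let t3 := t3 - time
      if q = 1 ∧ t3 < 0 ∧ time ≥ 61 then 2
      else rulejudgeLoop t1 t2 t3 t4 q rest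
    else
      let t2 := t2 - time
      let q := if t2 < 0 ∧ time ≥ 31 then 1 else q
      let t4 := t4 - time
      if q = 1 ∧ t4 < 0 ∧ time ≥ 61 then 2
      else rulejudgeLoop t1 t2 t3 t4 q rest

def rulejudge (thinking_times : List Int) : Int :=
  rulejudgeLoop 60 60 900 900 0 (PySem.List.enumerate thinking_times 0)

-- ===== PORT B =====
-- the deinterleaving for-loop over enumerate(thinking_times)
def rulejudgeAltSplit (thinking_times : List Int) : List Int × List Int :=
  (PySem.List.enumerate thinking_times 0).foldl
    (fun ab p =>
      if PySem.Int.mod p.1 2 = 0 then (ab.1 ++ [p.2], ab.2) else (ab.1, ab.2 ++ [p.2]))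
    ([], [])

-- the helper 'scan': one running-sum pass over a single player's moves
def rulejudgeAltScan : Int → Bool → Bool → List Int → Bool × Bool
  | _, flag, hard, [] => (flag, hard)
  | total, flag, hard, t :: rest =>
    let total := total + t
    let flag := if total > 60 ∧ t ≥ 31 then true else flag
    let hard := if total > 900 ∧ t ≥ 61 then true else hard
    rulejudgeAltScan total flag hard rest

def rulejudge_alt (thinking_times : List Int) : Int :=
  let fs := rulejudgeAltSplit thinking_times
  let r1 := rulejudgeAltScan 0 false false fs.1
  let r2 := rulejudgeAltScan 0 false false fs.2
  if r1.2 || r2.2 then 2 else if r1.1 || r2.1 then 1 else 0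

-- ===== PRECONDITION & SPEC =====
def Spec_rulejudge (thinking_times : List Int) (out : Int) : Prop := out = rulejudge_alt thinking_times
instance (thinking_times : List Int) (out : Int) : Decidable (Spec_rulejudge thinking_times out) := by unfold Spec_rulejudge; infer_instance

-- ===== CLAIM (what is proved, stated in full; the proofs are below) =====
def Claim_equal_rulejudge : Prop := ∀ (thinking_times : List Int), Dom_rulejudge thinking_times → Spec_rulejudge thinking_times (rulejudge thinking_times)

-- ===== LEMMAS AND PROOFS =====

-- every-other element (the even-position subsequence); everyOther xs.tail is the odd-position one
def everyOther : List Int → List Int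
  | [] => []
  | [x] => [x]
  | x :: _ :: rest => x :: everyOther rest

theorem everyOther_cons (t : Int) (rest : List Int) :
    everyOther (t :: rest) = t :: everyOther rest.tail := by
  cases rest <;> rfl

-- 'flag was ever set' / 'hard was ever set' along a scan starting from sum s
def flagOf : Int → List Int → Bool
  | _, [] => false
  | s, t :: r => (decide (s + t > 60 ∧ t ≥ 31)) || flagOf (s + t) r

def hardOf : Int → List Int → Bool
  | _, [] => false
  | s, t :: r => (decide (s + t > 900 ∧ t ≥ 61)) || hardOf (s + t) r

theorem scan_eq (l : List Int) : ∀ (s : Int) (f h : Bool),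
    rulejudgeAltScan s f h l = (f || flagOf s l, h || hardOf s l) := by
  induction l with
  | nil => intro s f h; simp [rulejudgeAltScan, flagOf, hardOf]
  | cons t r ih =>
    intro s f h
    simp only [rulejudgeAltScan, flagOf, hardOf, ih]
    by_cases h1 : s + t > 60 ∧ t ≥ 31 <;> by_cases h2 : s + t > 900 ∧ t ≥ 61 <;>
      simp [h1, h2]

-- the combined verdict B computes, as a function of the two players' start sums and the shared flag
def verdict (q : Bool) (a b : Int) (xs : List Int) : Int :=
  if hardOf a (everyOther xs) || hardOf b (everyOther xs.tail) then 2
  else if q || flagOf a (everyOther xs) || flagOf b (everyOther xs.tail) then 1 else 0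

theorem verdict_cons_hard (q : Bool) (a b t : Int) (rest : List Int)
    (hH : a + t > 900 ∧ t ≥ 61) : verdict q a b (t :: rest) = 2 := by
  simp only [verdict, everyOther_cons, hardOf]
  simp [hH]

theorem verdict_cons (q : Bool) (a b t : Int) (rest : List Int) (hH : ¬(a + t > 900 ∧ t ≥ 61)) :
    verdict q a b (t :: rest) = verdict (decide (a + t > 60 ∧ t ≥ 31) || q) b (a + t) rest := by
  simp only [verdict, everyOther_cons, flagOf, hardOf, List.tail_cons, decide_eq_false hH,
    Bool.false_or]
  cases q <;> simp [Bool.or_comm, Bool.or_left_comm]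

theorem mod_two_of_even (i : Int) (h : i % 2 = 0) : PySem.Int.mod i 2 = 0 := by
  simp [PySem.Int.mod, Int.fmod_eq_emod]; omega

theorem mod_two_of_odd (i : Int) (h : i % 2 = 1) : PySem.Int.mod i 2 ≠ 0 := by
  simp [PySem.Int.mod, Int.fmod_eq_emod]; omega

-- A's loop, with budgets written as 60/900 minus the running sums, equals B's verdict
theorem loopA_eq (xs : List Int) : ∀ (s : Int), 0 ≤ s → ∀ (s1 s2 : Int) (q : Bool),
    rulejudgeLoop (60 - s1) (60 - s2) (900 - s1) (900 - s2) (if q then 1 else 0)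
        (PySem.List.enumerate xs s)
      = (if s % 2 = 0 then verdict q s1 s2 xs else verdict q s2 s1 xs) := by
  induction xs with
  | nil =>
    intro s hs s1 s2 q
    cases q <;>
      simp [PySem.List.enumerate_nil, rulejudgeLoop, verdict, flagOf, hardOf, everyOther]
  | cons t rest ih =>
    intro s hs s1 s2 q
    rw [PySem.List.enumerate_cons]
    by_cases hp : s % 2 = 0
    · simp only [rulejudgeLoop, if_pos (mod_two_of_even s hp), if_pos hp]
      have hqsel : (if 60 - s1 - t < 0 ∧ t ≥ 31 then (1 : Int) else if q then 1 else 0)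
          = (if (decide (s1 + t > 60 ∧ t ≥ 31) || q) then 1 else 0) := by
        cases q <;> split_ifs <;> simp_all <;> omega
      rw [hqsel]
      by_cases hHard : 900 - s1 - t < 0 ∧ t ≥ 61
      · have hq1 : (decide (s1 + t > 60 ∧ t ≥ 31) || q) = true := by
          simp only [Bool.or_eq_true, decide_eq_true_eq]
          exact Or.inl ⟨by omega, by omega⟩
        have hcond : ((if (decide (s1 + t > 60 ∧ t ≥ 31) || q) then (1 : Int) else 0) = 1
            ∧ (900 - s1 - t < 0 ∧ t ≥ 61)) := ⟨by rw [if_pos hq1], hHard⟩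
        rw [if_pos hcond]
        exact (verdict_cons_hard q s1 s2 t rest ⟨by omega, hHard.2⟩).symm
      · rw [if_neg (fun h => hHard h.2),
          show (60 : Int) - s1 - t = 60 - (s1 + t) from by ring,
          show (900 : Int) - s1 - t = 900 - (s1 + t) from by ring,
          ih (s + 1) (by omega) (s1 + t) s2 (decide (s1 + t > 60 ∧ t ≥ 31) || q),
          if_neg (by omega : ¬ (s + 1) % 2 = 0)]
        exact (verdict_cons q s1 s2 t rest
          (by rintro ⟨h1, h2⟩; exact hHard ⟨by omega, h2⟩)).symm
    · have hp1 : s % 2 = 1 := by omega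
      simp only [rulejudgeLoop, if_neg (mod_two_of_odd s hp1), if_neg hp]
      have hqsel : (if 60 - s2 - t < 0 ∧ t ≥ 31 then (1 : Int) else if q then 1 else 0)
          = (if (decide (s2 + t > 60 ∧ t ≥ 31) || q) then 1 else 0) := by
        cases q <;> split_ifs <;> simp_all <;> omega
      rw [hqsel]
      by_cases hHard : 900 - s2 - t < 0 ∧ t ≥ 61
      · have hq1 : (decide (s2 + t > 60 ∧ t ≥ 31) || q) = true := by
          simp only [Bool.or_eq_true, decide_eq_true_eq]
          exact Or.inl ⟨by omega, by omega⟩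
        have hcond : ((if (decide (s2 + t > 60 ∧ t ≥ 31) || q) then (1 : Int) else 0) = 1
            ∧ (900 - s2 - t < 0 ∧ t ≥ 61)) := ⟨by rw [if_pos hq1], hHard⟩
        rw [if_pos hcond]
        exact (verdict_cons_hard q s2 s1 t rest ⟨by omega, hHard.2⟩).symm
      · rw [if_neg (fun h => hHard h.2),
          show (60 : Int) - s2 - t = 60 - (s2 + t) from by ring,
          show (900 : Int) - s2 - t = 900 - (s2 + t) from by ring,
          ih (s + 1) (by omega) s1 (s2 + t) (decide (s2 + t > 60 ∧ t ≥ 31) || q),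
          if_pos (by omega : (s + 1) % 2 = 0)]
        exact (verdict_cons q s2 s1 t rest
          (by rintro ⟨h1, h2⟩; exact hHard ⟨by omega, h2⟩)).symm

-- B's deinterleaving foldl builds exactly the two every-other subsequences
theorem split_general (xs : List Int) : ∀ (s : Int), 0 ≤ s → ∀ (a b : List Int),
    (PySem.List.enumerate xs s).foldl
      (fun ab p =>
        if PySem.Int.mod p.1 2 = 0 then (ab.1 ++ [p.2], ab.2) else (ab.1, ab.2 ++ [p.2]))
      (a, b)
    = (if s % 2 = 0 then (a ++ everyOther xs, b ++ everyOther xs.tail)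
       else (a ++ everyOther xs.tail, b ++ everyOther xs)) := by
  induction xs with
  | nil =>
    intro s hs a b
    simp [PySem.List.enumerate_nil, everyOther]
  | cons t rest ih =>
    intro s hs a b
    rw [PySem.List.enumerate_cons]
    by_cases hp : s % 2 = 0
    · simp only [List.foldl_cons, if_pos (mod_two_of_even s hp), if_pos hp]
      rw [ih (s + 1) (by omega) (a ++ [t]) b,
        if_neg (by omega : ¬ (s + 1) % 2 = 0)]
      simp [everyOther_cons]
    · have hp1 : s % 2 = 1 := by omega
      simp only [List.foldl_cons, if_neg (mod_two_of_odd s hp1), if_neg hp]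
      rw [ih (s + 1) (by omega) a (b ++ [t]),
        if_pos (by omega : (s + 1) % 2 = 0)]
      simp [everyOther_cons]

theorem split_eq (xs : List Int) :
    rulejudgeAltSplit xs = (everyOther xs, everyOther xs.tail) := by
  unfold rulejudgeAltSplit
  rw [split_general xs 0 (by omega) [] []]
  simp

-- ===== VERDICT (by name: the statement is the Claim_ definition above) =====
theorem rulejudge_spec : Claim_equal_rulejudge := by
  intro xs _
  show rulejudge xs = rulejudge_alt xs
  have hmain := loopA_eq xs 0 (by omega) 0 0 false
  norm_num at hmain
  unfold rulejudge rulejudge_alt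
  rw [hmain, split_eq]
  simp [scan_eq, verdict]
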